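-- pv_equiv track=rewrite | github.com/tts-tcq-2024/tdd-practice-in-py-parideiveegan | StringCalculator.py | get_sum
-- ===== SOURCE A (Python) =====
-- def ConvertToNumber(number,inputstring):
--     converted_number = 0
--     for index in number:
--         value = ord(inputstring[index]) - ord('0')
--         converted_number = value + (converted_number*10)
--     return converted_number
--
-- def check_negative(numbers,inputstring):
--     index = 0
--     negative_numbers = []
--     number = []
--     while index <= len(numbers)-1:
--         number = numbers[index]
--         minus_index = inputstring[number[0]-1]
--         if minus_index == '-':
--             negative_numbers.append(number)
--         index +=1
--     return negative_numbers
--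
-- def check_exception(negative_numbers,inputstring):
--
--     if negative_numbers:
--         statement = "negatives not allowed : "
--         index = 0
--         number = 0
--         while index<= len(negative_numbers)-1:
--             number = ConvertToNumber(negative_numbers[index],inputstring)
--             statement += (" -"+str(number))
--             index +=1
--
--         raise Exception(statement)
--
-- def get_sum(numbers,inputstring):
--     total_sum = 0
--     index = 0
--     negative_numbers = check_negative(numbers,inputstring)
--     check_exception(negative_numbers,inputstring)
--     while index <= len(numbers)-1:
--         number = numbers[index]
--         integer = ConvertToNumber(number,inputstring)
--         if integer <= 1000:
--             total_sum += ConvertToNumber(number,inputstring)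
--         index+=1
--     return total_sum
-- ===== SOURCE B (Python) =====
-- def get_sum(numbers, inputstring):
--     # Single pass: each number is parsed exactly once as a positional power sum;
--     # negatives (char before the first digit is '-') and the running total are
--     # collected together, and the exception is raised only at the end.
--     total = 0
--     negatives = []
--     for num in numbers:
--         value = sum((ord(inputstring[i]) - 48) * 10 ** j
--                     for j, i in enumerate(reversed(num)))
--         if inputstring[num[0] - 1] == '-':
--             negatives.append(value)
--         elif value <= 1000:
--             total += value
--     if negatives:
--         raise Exception("negatives not allowed : "
--                         + "".join(" -" + str(v) for v in negatives))
--     return total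
-- ===== Notes on version B (the rewrite author's own statement) =====
-- stated objective: alternative
-- what changed: B replaces A's three separate re-scanning loops (negative scan, exception loop, sum loop that parses each number twice with a Horner loop) by a single pass that parses each number exactly once as a positional power sum and accumulates the total and the negatives together, raising only at the end.
import Mathlib
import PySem

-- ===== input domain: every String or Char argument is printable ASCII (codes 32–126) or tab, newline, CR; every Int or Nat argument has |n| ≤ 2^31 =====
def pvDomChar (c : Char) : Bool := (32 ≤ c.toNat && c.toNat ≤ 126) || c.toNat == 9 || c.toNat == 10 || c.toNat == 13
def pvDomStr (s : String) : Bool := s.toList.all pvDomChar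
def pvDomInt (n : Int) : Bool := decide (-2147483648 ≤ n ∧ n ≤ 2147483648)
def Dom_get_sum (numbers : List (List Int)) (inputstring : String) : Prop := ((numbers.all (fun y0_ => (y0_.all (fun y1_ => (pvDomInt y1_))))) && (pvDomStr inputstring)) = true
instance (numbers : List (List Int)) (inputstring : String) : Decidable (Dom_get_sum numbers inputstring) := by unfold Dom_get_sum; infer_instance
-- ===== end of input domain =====

-- B folds the work into ONE pass that parses each number exactly once (as a positional
-- power sum instead of A's Horner re-parsing loops) and collects negatives and the total
-- together; equivalence claimed on inputs where A returns normally (Pre_ below).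

-- ===== PORT A =====
-- ord(inputstring[i]) - 48; default '0' is arbitrary: it is only reached where Python raises IndexError (outside Pre_)
def pvCharVal (inputstring : String) (i : Int) : Int :=
  (((PySem.Str.pyGet? inputstring i).getD '0').toNat : Int) - 48

def ConvertToNumber (number : List Int) (inputstring : String) : Int :=
  number.foldl (fun acc i => pvCharVal inputstring i + acc * 10) 0

-- while loop over indices = foldl over the list; number[0] on an empty number raises (outside Pre_)
def check_negative (numbers : List (List Int)) (inputstring : String) : List (List Int) :=
  numbers.foldl (fun acc num =>
    if (PySem.Str.pyGet? inputstring (num.headD 0 - 1)).getD ' ' = '-' then acc ++ [num] else acc) []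

def get_sum (numbers : List (List Int)) (inputstring : String) : Int :=
  let negs := check_negative numbers inputstring
  if negs.isEmpty then
    numbers.foldl (fun tot num =>
      let integer := ConvertToNumber num inputstring
      if integer ≤ 1000 then tot + ConvertToNumber num inputstring else tot) 0
  else 0  -- Python raises Exception("negatives not allowed : …") here; outside Pre_

-- ===== PORT B =====
-- sum((ord(inputstring[i]) - 48) * 10 ** j for j, i in enumerate(reversed(num)))
def pvValueB (num : List Int) (inputstring : String) : Int :=
  (num.reverse.zipIdx).foldl (fun a p => a + pvCharVal inputstring p.1 * 10 ^ p.2) 0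

def get_sum_alt (numbers : List (List Int)) (inputstring : String) : Int :=
  let st := numbers.foldl (fun (st : Int × List Int) num =>
    let value := pvValueB num inputstring
    if (PySem.Str.pyGet? inputstring (num.headD 0 - 1)).getD ' ' = '-' then (st.1, st.2 ++ [value])
    else if value ≤ 1000 then (st.1 + value, st.2) else st) ((0 : Int), ([] : List Int))
  if st.2.isEmpty then st.1 else 0  -- Python raises the same Exception here; outside Pre_

-- ===== PRECONDITION & SPEC =====
-- Pre_ excludes exactly the inputs on which A raises: an empty number (IndexError on number[0]),
-- an index outside Python's range for inputstring (IndexError), and a number marked negative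
-- (the char before its first digit is '-': A raises Exception; B raises the same Exception).
def Pre_get_sum (numbers : List (List Int)) (inputstring : String) : Prop :=
  ∀ num ∈ numbers, num ≠ [] ∧
    (∀ i ∈ num, (PySem.Str.pyGet? inputstring i).isSome) ∧
    (PySem.Str.pyGet? inputstring (num.headD 0 - 1)).isSome ∧
    PySem.Str.pyGet? inputstring (num.headD 0 - 1) ≠ some '-'
instance (numbers : List (List Int)) (inputstring : String) : Decidable (Pre_get_sum numbers inputstring) := by
  unfold Pre_get_sum; infer_instance

def pvWitness_get_sum : List (List Int) × String := ([[0], [1, 2]], "4,25")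

def Spec_get_sum (numbers : List (List Int)) (inputstring : String) (out : Int) : Prop := out = get_sum_alt numbers inputstring
instance (numbers : List (List Int)) (inputstring : String) (out : Int) : Decidable (Spec_get_sum numbers inputstring out) := by unfold Spec_get_sum; infer_instance

-- ===== CLAIM (what is proved, stated in full; the proofs are below) =====
def Claim_equal_get_sum : Prop := ∀ (numbers : List (List Int)) (inputstring : String), Dom_get_sum numbers inputstring → Pre_get_sum numbers inputstring → Spec_get_sum numbers inputstring (get_sum numbers inputstring)

-- ===== LEMMAS AND PROOFS =====

-- B's power-sum value of i :: t adds the leading digit at place 10^|t|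
theorem pvValueB_cons (i : Int) (t : List Int) (s : String) :
    pvValueB (i :: t) s = pvValueB t s + pvCharVal s i * 10 ^ t.length := by
  simp [pvValueB, List.zipIdx_append, List.foldl_append]

-- A's Horner loop with accumulator acc computes acc·10^len plus B's power sum
theorem horner_eq (s : String) (l : List Int) (acc : Int) :
    l.foldl (fun a i => pvCharVal s i + a * 10) acc = acc * 10 ^ l.length + pvValueB l s := by
  induction l generalizing acc with
  | nil => simp [pvValueB]
  | cons i t ih =>
      simp only [List.foldl_cons, ih, pvValueB_cons, List.length_cons]
      ring

theorem convert_eq (num : List Int) (s : String) : ConvertToNumber num s = pvValueB num s := by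
  simpa using horner_eq s num 0

-- under Pre_, the '-' test of both programs is false for every listed number
theorem pvCondFalse (s : String) (num : List Int)
    (h1 : (PySem.Str.pyGet? s (num.headD 0 - 1)).isSome)
    (h2 : PySem.Str.pyGet? s (num.headD 0 - 1) ≠ some '-') :
    ((PySem.Str.pyGet? s (num.headD 0 - 1)).getD ' ' = '-') = False := by
  cases hg : PySem.Str.pyGet? s (num.headD 0 - 1) with
  | none => rw [hg] at h1; simp at h1
  | some c => rw [hg] at h2; simp_all

theorem check_negative_nil (numbers : List (List Int)) (s : String)
    (h : ∀ num ∈ numbers, ((PySem.Str.pyGet? s (num.headD 0 - 1)).getD ' ' = '-') = False) :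
    check_negative numbers s = [] := by
  unfold check_negative
  induction numbers with
  | nil => rfl
  | cons num rest ih =>
      simp only [List.foldl_cons, h num (List.mem_cons_self ..)]
      exact ih (fun n hn => h n (List.mem_cons_of_mem _ hn))

theorem fold_agree (s : String) (numbers : List (List Int))
    (h : ∀ num ∈ numbers, ((PySem.Str.pyGet? s (num.headD 0 - 1)).getD ' ' = '-') = False) :
    ∀ t : Int,
      numbers.foldl (fun (st : Int × List Int) num =>
        let value := pvValueB num s
        if (PySem.Str.pyGet? s (num.headD 0 - 1)).getD ' ' = '-' then (st.1, st.2 ++ [value])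
        else if value ≤ 1000 then (st.1 + value, st.2) else st) (t, ([] : List Int))
      = (numbers.foldl (fun tot num =>
          let integer := ConvertToNumber num s
          if integer ≤ 1000 then tot + ConvertToNumber num s else tot) t, []) := by
  induction numbers with
  | nil => intro t; rfl
  | cons num rest ih =>
      intro t
      have hc := h num (List.mem_cons_self ..)
      have hrest := fun n hn => h n (List.mem_cons_of_mem _ hn)
      rw [List.foldl_cons, List.foldl_cons]
      simp only [hc, if_false]
      by_cases hle : pvValueB num s ≤ 1000
      · rw [if_pos hle, if_pos (by rwa [convert_eq])]
        rw [convert_eq]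
        exact ih hrest (t + pvValueB num s)
      · rw [if_neg hle, if_neg (by rwa [convert_eq])]
        exact ih hrest t

-- ===== VERDICT (by name: the statement is the Claim_ definition above) =====
theorem get_sum_spec : Claim_equal_get_sum := by
  intro numbers s _ hpre
  have h : ∀ num ∈ numbers, ((PySem.Str.pyGet? s (num.headD 0 - 1)).getD ' ' = '-') = False := by
    intro num hn
    exact pvCondFalse s num (hpre num hn).2.2.1 (hpre num hn).2.2.2
  unfold Spec_get_sum get_sum get_sum_alt
  rw [check_negative_nil numbers s h, fold_agree s numbers h 0]
  simp
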